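-- pv_equiv track=rewrite | github.com/bpraveen92/Data-Engineering-Projects | ETL-Project-3/scripts/glue_trip_aggregator.py | resolve_runtime_option
-- ===== SOURCE A (Python) =====
-- def resolve_runtime_option(argv, option_name, default_value=None):
--     """
--     Read optional argument from argv, supporting underscore and dash flag styles.
--
--     Args:
--         argv: Full argument list
--         option_name: Base option name without leading dashes
--         default_value: Value to return when option is not found
--
--     Returns:
--         String option value or default_value
--
--     Sample input:
--         argv = ["job.py", "--top_routes_limit", "5"]
--         option_name = "top_routes_limit"
--
--     Sample output:
--         "5"
--     """
--     option_variants = [option_name, option_name.replace("_", "-")]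
--     for variant in option_variants:
--         flag = f"--{variant}"
--         for index, token in enumerate(argv):
--             if token == flag and index + 1 < len(argv):
--                 return argv[index + 1]
--             if token.startswith(flag + "="):
--                 return token.split("=", 1)[1]
--     return default_value
-- ===== SOURCE B (Python) =====
-- _MISSING = object()
--
--
-- def _match_flag(argv, flag, index, token):
--     """Value produced by this token for this flag, or _MISSING."""
--     if token == flag and index + 1 < len(argv):
--         return argv[index + 1]
--     if token.startswith(flag + "="):
--         return token.split("=", 1)[1]
--     return _MISSING
--
--
-- def resolve_runtime_option(argv, option_name, default_value=None):
--     """Single pass over argv, recording the first hit for each flag style."""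
--     flag_u = "--" + option_name
--     flag_d = "--" + option_name.replace("_", "-")
--     found_u = _MISSING
--     found_d = _MISSING
--     for index, token in enumerate(argv):
--         if found_u is _MISSING:
--             found_u = _match_flag(argv, flag_u, index, token)
--         if found_d is _MISSING:
--             found_d = _match_flag(argv, flag_d, index, token)
--     if found_u is not _MISSING:
--         return found_u
--     if found_d is not _MISSING:
--         return found_d
--     return default_value
-- ===== Notes on version B (the rewrite author's own statement) =====
-- stated objective: alternative
-- what changed: A scans argv once per flag variant with an early return inside nested loops; B makes a single pass over argv, recording the first hit for each of the two flag styles in sentinel slots and applying the underscore-before-dash priority after the loop.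
import Mathlib
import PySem

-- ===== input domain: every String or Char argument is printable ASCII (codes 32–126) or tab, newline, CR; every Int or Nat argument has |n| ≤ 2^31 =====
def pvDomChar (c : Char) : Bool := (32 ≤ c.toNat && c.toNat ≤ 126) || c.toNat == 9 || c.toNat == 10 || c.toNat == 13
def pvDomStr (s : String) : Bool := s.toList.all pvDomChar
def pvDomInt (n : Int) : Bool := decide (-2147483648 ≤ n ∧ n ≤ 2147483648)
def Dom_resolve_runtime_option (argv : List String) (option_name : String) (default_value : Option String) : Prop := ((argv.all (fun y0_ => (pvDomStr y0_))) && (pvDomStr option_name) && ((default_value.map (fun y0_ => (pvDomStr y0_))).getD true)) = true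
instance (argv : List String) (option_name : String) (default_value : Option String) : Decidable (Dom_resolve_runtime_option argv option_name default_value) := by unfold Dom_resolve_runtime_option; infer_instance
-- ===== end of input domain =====

-- B is a structurally different re-implementation (one pass over argv with two first-hit
-- slots instead of one early-return scan per flag variant); same return value everywhere.

-- ===== PORT A =====

-- token.split("=", 1)[1]; the [1] access is always guarded by token.startswith(flag + "="),
-- so the element exists and getD is exact there.
def pvSplitEq (token : String) : String :=
  ((PySem.Str.splitMax? token "=" 1).getD []).getD 1 ""

-- A's inner loop: 'for index, token in enumerate(argv)' with the two early returns.
def pvAScan (argv : List String) (flag : String) (index : Nat) : List String → Option String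
  | [] => none
  | token :: rest =>
    if token = flag ∧ index + 1 < argv.length then
      PySem.List.pyGet? argv ((index : Int) + 1)
    else if PySem.Str.startswith token (flag ++ "=") then
      some (pvSplitEq token)
    else
      pvAScan argv flag (index + 1) rest

-- A's outer loop: 'for variant in option_variants', falling through to default_value.
def pvAVariants (argv : List String) (default_value : Option String) : List String → Option String
  | [] => default_value
  | v :: vs =>
    match pvAScan argv ("--" ++ v) 0 argv with
    | some r => some r
    | none => pvAVariants argv default_value vs

def resolve_runtime_option (argv : List String) (option_name : String) (default_value : Option String) : Option String :=
  pvAVariants argv default_value [option_name, PySem.Str.replace option_name "_" "-"]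

-- ===== PORT B =====

-- B's helper _match_flag: the value this token yields for this flag (none = _MISSING).
def pvMatchFlag (argv : List String) (flag : String) (index : Nat) (token : String) : Option String :=
  if token = flag ∧ index + 1 < argv.length then
    PySem.List.pyGet? argv ((index : Int) + 1)
  else if PySem.Str.startswith token (flag ++ "=") then
    some (pvSplitEq token)
  else
    none

-- B's single pass, carrying the two first-hit slots (found_u, found_d).
def pvBFold (argv : List String) (flag_u flag_d : String) : Nat → List String → Option String × Option String → Option String × Option String
  | _, [], s => s
  | index, token :: rest, (fu, fd) =>
    let fu' := if fu.isNone then pvMatchFlag argv flag_u index token else fu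
    let fd' := if fd.isNone then pvMatchFlag argv flag_d index token else fd
    pvBFold argv flag_u flag_d (index + 1) rest (fu', fd')

def resolve_runtime_option_alt (argv : List String) (option_name : String) (default_value : Option String) : Option String :=
  let flag_u := "--" ++ option_name
  let flag_d := "--" ++ PySem.Str.replace option_name "_" "-"
  match pvBFold argv flag_u flag_d 0 argv (none, none) with
  | (some v, _) => some v
  | (none, some v) => some v
  | (none, none) => default_value

-- ===== PRECONDITION & SPEC =====
def Spec_resolve_runtime_option (argv : List String) (option_name : String) (default_value : Option String) (out : Option String) : Prop := out = resolve_runtime_option_alt argv option_name default_value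
instance (argv : List String) (option_name : String) (default_value : Option String) (out : Option String) : Decidable (Spec_resolve_runtime_option argv option_name default_value out) := by unfold Spec_resolve_runtime_option; infer_instance

-- ===== CLAIM (what is proved, stated in full; the proofs are below) =====
def Claim_equal_resolve_runtime_option : Prop := ∀ (argv : List String) (option_name : String) (default_value : Option String), Dom_resolve_runtime_option argv option_name default_value → Spec_resolve_runtime_option argv option_name default_value (resolve_runtime_option argv option_name default_value)

-- ===== LEMMAS AND PROOFS =====

theorem pvAScan_cons (argv : List String) (flag : String) (index : Nat) (token : String) (rest : List String) :
    pvAScan argv flag index (token :: rest)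
      = (pvMatchFlag argv flag index token).or (pvAScan argv flag (index + 1) rest) := by
  simp only [pvAScan, pvMatchFlag]
  split_ifs with h1 h2 <;> simp [Option.or]
  have hc : ((index : Int) + 1) = ((index + 1 : Nat) : Int) := by push_cast; ring
  rw [hc, PySem.List.pyGet?_natCast, List.getElem?_eq_getElem h1.2]

-- B's pass computes, in each slot, the slot's old value or else A's scan of the remainder.
theorem pvBFold_eq (argv : List String) (f1 f2 : String) :
    ∀ (rest : List String) (index : Nat) (fu fd : Option String),
      pvBFold argv f1 f2 index rest (fu, fd)
        = (fu.or (pvAScan argv f1 index rest), fd.or (pvAScan argv f2 index rest)) := by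
  intro rest
  induction rest with
  | nil => intro index fu fd; simp [pvBFold, pvAScan]
  | cons token rest ih =>
    intro index fu fd
    simp only [pvBFold, ih, pvAScan_cons]
    cases fu <;> cases fd <;> simp [Option.or]

theorem resolve_runtime_option_spec : Claim_equal_resolve_runtime_option := by
  intro argv option_name default_value _
  unfold Spec_resolve_runtime_option resolve_runtime_option resolve_runtime_option_alt
  simp only [pvBFold_eq, Option.or, pvAVariants]
  cases pvAScan argv ("--" ++ option_name) 0 argv <;>
    cases pvAScan argv ("--" ++ PySem.Str.replace option_name "_" "-") 0 argv <;> rfl
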